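-- pv_equiv track=rewrite | github.com/sancovp/sanctuary-revolution-alpha | starsystem/starlog-mcp/starlog_mcp/starlog_mcp.py | _filter_flight_data
-- ===== SOURCE A (Python) =====
-- def _filter_flight_data(flight_data: dict, path: str, this_project_only: bool, category: str = None) -> dict:
--     """Filter flight data by project and category."""
--     if this_project_only:
--         flight_data = {k: v for k, v in flight_data.items()
--                       if v.get("original_project_path") == path}
--
--     if category:
--         flight_data = {k: v for k, v in flight_data.items()
--                       if v.get("category") == category}
--
--     return flight_data
-- ===== SOURCE B (Python) =====
-- def _filter_flight_data(flight_data: dict, path: str, this_project_only: bool, category: str = None) -> dict: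
--     """Filter flight data by project and category: build the list of required
--     (key, value) checks once, then one explicit pass with an accumulator."""
--     checks = []
--     if this_project_only:
--         checks.append(("original_project_path", path))
--     if category:
--         checks.append(("category", category))
--     result = {}
--     for k, v in flight_data.items():
--         if all(v.get(key) == want for key, want in checks):
--             result[k] = v
--     return result
-- ===== Notes on version B (the rewrite author's own statement) =====
-- stated objective: alternative
-- what changed: Replaces A's two sequential conditional dict-comprehension passes by a data-driven design: the active (field, expected value) checks are collected into a list once, then a single explicit loop with an accumulator keeps an entry iff all() checks hold.
import Mathlib
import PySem

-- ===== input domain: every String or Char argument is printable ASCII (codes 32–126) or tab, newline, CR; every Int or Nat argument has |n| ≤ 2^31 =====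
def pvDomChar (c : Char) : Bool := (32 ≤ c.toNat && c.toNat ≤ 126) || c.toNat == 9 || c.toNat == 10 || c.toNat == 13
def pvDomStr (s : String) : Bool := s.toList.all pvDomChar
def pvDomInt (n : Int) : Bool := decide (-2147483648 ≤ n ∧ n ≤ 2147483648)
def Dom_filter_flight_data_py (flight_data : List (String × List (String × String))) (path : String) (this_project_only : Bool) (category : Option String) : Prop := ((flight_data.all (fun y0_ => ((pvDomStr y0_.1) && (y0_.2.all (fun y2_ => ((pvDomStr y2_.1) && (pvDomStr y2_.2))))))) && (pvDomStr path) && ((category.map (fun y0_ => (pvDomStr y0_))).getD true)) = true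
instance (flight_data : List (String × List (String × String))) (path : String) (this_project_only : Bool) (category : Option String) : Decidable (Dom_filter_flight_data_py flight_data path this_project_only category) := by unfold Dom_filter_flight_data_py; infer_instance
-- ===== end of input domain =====

-- B replaces A's two sequential conditional filter passes by a list of (field, expected) checks built once and a single accumulator loop testing them all (objective: alternative).


-- ===== PORT A =====
-- v.get(key): first-match lookup in the association list (exact: PySem.Dict is insertion-ordered, first match)
def fdGet (v : List (String × String)) (k : String) : Option String := (PySem.Dict.mk v).get? k

-- Python truthiness of the optional string 'category' (None and "" are falsy)
def catTruthy (category : Option String) : Bool :=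
  match category with
  | none => false
  | some c => !(c == "")

def filter_flight_data_py (flight_data : List (String × List (String × String))) (path : String) (this_project_only : Bool) (category : Option String) : List (String × List (String × String)) :=
  let fd1 := if this_project_only then
      flight_data.filter (fun kv => fdGet kv.2 "original_project_path" == some path)
    else flight_data
  if catTruthy category then
    fd1.filter (fun kv => fdGet kv.2 "category" == category)
  else fd1

-- ===== PORT B =====
-- the 'checks' list Source B builds with the two conditional appends
def fdChecks (path : String) (this_project_only : Bool) (category : Option String) : List (String × String) :=
  (if this_project_only then [("original_project_path", path)] else []) ++
  (match category with
   | some c => if c == "" then [] else [("category", c)]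
   | none => [])

def filter_flight_data_py_alt (flight_data : List (String × List (String × String))) (path : String) (this_project_only : Bool) (category : Option String) : List (String × List (String × String)) :=
  let checks := fdChecks path this_project_only category
  flight_data.foldl (fun result kv =>
    if checks.all (fun ck => fdGet kv.2 ck.1 == some ck.2) then result ++ [kv] else result) []

-- ===== PRECONDITION & SPEC =====
def Spec_filter_flight_data_py (flight_data : List (String × List (String × String))) (path : String) (this_project_only : Bool) (category : Option String) (out : List (String × List (String × String))) : Prop := out = filter_flight_data_py_alt flight_data path this_project_only category
instance (flight_data : List (String × List (String × String))) (path : String) (this_project_only : Bool) (category : Option String) (out : List (String × List (String × String))) : Decidable (Spec_filter_flight_data_py flight_data path this_project_only category out) := by unfold Spec_filter_flight_data_py; infer_instance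

-- ===== CLAIM (what is proved, stated in full; the proofs are below) =====
def Claim_equal_filter_flight_data_py : Prop := ∀ (flight_data : List (String × List (String × String))) (path : String) (this_project_only : Bool) (category : Option String), Dom_filter_flight_data_py flight_data path this_project_only category → Spec_filter_flight_data_py flight_data path this_project_only category (filter_flight_data_py flight_data path this_project_only category)

-- ===== LEMMAS AND PROOFS =====
-- B's accumulator loop is the filter by the conjunction of all checks
theorem alt_eq_filter (flight_data : List (String × List (String × String))) (path : String) (tpo : Bool) (cat : Option String) :
    filter_flight_data_py_alt flight_data path tpo cat =
      flight_data.filter (fun kv => (fdChecks path tpo cat).all (fun ck => fdGet kv.2 ck.1 == some ck.2)) := by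
  unfold filter_flight_data_py_alt
  exact PySem.List.foldl_append_if_eq_filter _ _ _

-- ===== VERDICT (by name: the statement is the Claim_ definition above) =====
theorem filter_flight_data_py_spec : Claim_equal_filter_flight_data_py := by
  intro fd path tpo cat _
  unfold Spec_filter_flight_data_py
  rw [alt_eq_filter]
  unfold filter_flight_data_py fdChecks
  rcases cat with _ | c
  · cases tpo <;> simp [catTruthy]
  · by_cases hc : c = "" <;> cases tpo <;>
      simp [catTruthy, hc, List.filter_filter, Bool.and_comm]
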